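-- pv_equiv track=rewrite | github.com/ZZR0/AttnCompress | code/attn_compress/attn_compress_service.py | _split_span_into_blocks_double_newline
-- ===== SOURCE A (Python) =====
-- def _split_span_into_blocks_double_newline(
--     span_text: str,
--     span_char_start: int,
-- ) -> list[tuple[int, int]]:
--     """按双换行（\\n{2,}）将 span 文本切分为多个 block。
--
--     参数:
--         span_text: span 的原始文本。
--         span_char_start: span 在 full_text 中的起始字符位置。
--
--     返回:
--         block 范围列表，每个元素为 (char_start, char_end)，相对于 full_text 的绝对位置。
--     """
--     block_ranges: list[tuple[int, int]] = []
--
--     current_pos = 0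
--     block_start = span_char_start
--     # 记录当前 block 最后一个"非空行"的内容结束位置（绝对坐标）
--     last_content_end = span_char_start
--     has_content = False
--
--     # 使用 splitlines(keepends=True) 处理换行，逻辑与 PPL 切分保持一致
--     for line in span_text.splitlines(keepends=True):
--         line_len = len(line)
--
--         # 计算该行内容的长度（去除末尾换行符）
--         content_len = line_len
--         if line.endswith("\r\n"):
--             content_len -= 2
--         elif line.endswith("\n") or line.endswith("\r"):
--             content_len -= 1
--
--         # 判断是否是空行（即内容长度为0，只含换行符）
--         if content_len == 0:
--             # 遇到空行，视为分隔符（或分隔符的一部分）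
--             if has_content:
--                 # 结算上一个 block
--                 # 注意：根据原正则 (\r?\n){2,} 的行为，Block 不包含触发分割的末尾换行符
--                 block_ranges.append((block_start, last_content_end))
--                 has_content = False
--
--             # 更新 block_start 跳过当前空行
--             current_pos += line_len
--             block_start = span_char_start + current_pos
--             last_content_end = block_start
--         else:
--             # 非空行
--             has_content = True
--             # 更新 last_content_end 为当前行内容的结束位置
--             # 注意：这里仅包含当前行的内容，不含其换行符。
--             # 但如果这是 block 中间行，其实下一行会接续上来，不会在这里截断。
--             # 这个 last_content_end 仅在下一行是空行触发结算时生效。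
--             last_content_end = span_char_start + current_pos + content_len
--             current_pos += line_len
--
--     # 添加最后一个 block（如果有剩余内容）
--     if has_content:
--         # 对于最后一个 block，包含一直到文本结束的所有字符（包括最后的换行符）
--         block_ranges.append((block_start, span_char_start + len(span_text)))
--
--     return block_ranges
-- ===== SOURCE B (Python) =====
-- from itertools import groupby
--
--
-- def _split_span_into_blocks_double_newline(
--     span_text: str,
--     span_char_start: int,
-- ) -> list[tuple[int, int]]:
--     """Two-pass variant: build per-line records, then group consecutive lines
--     by blankness with itertools.groupby and emit one range per non-blank group."""
--     # Pass 1: one record per line: (abs start, abs content end, is_blank)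
--     recs = []
--     pos = 0
--     for line in span_text.splitlines(keepends=True):
--         content_len = len(line)
--         if line.endswith("\r\n"):
--             content_len -= 2
--         elif line.endswith("\n") or line.endswith("\r"):
--             content_len -= 1
--         recs.append((span_char_start + pos,
--                      span_char_start + pos + content_len,
--                      content_len == 0))
--         pos += len(line)
--
--     end_of_text = span_char_start + len(span_text)
--
--     # Pass 2: group consecutive records by blankness; each non-blank group is a
--     # block from its first line's start to its last line's content end; the
--     # group that reaches the end of the text keeps the trailing terminators.
--     groups = [(blank, list(grp)) for blank, grp in groupby(recs, key=lambda r: r[2])]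
--     blocks = []
--     for i, (blank, grp) in enumerate(groups):
--         if not blank:
--             end = end_of_text if i == len(groups) - 1 else grp[-1][1]
--             blocks.append((grp[0][0], end))
--     return blocks
-- ===== Notes on version B (the rewrite author's own statement) =====
-- stated objective: alternative
-- what changed: Replaces A's single stateful scan (has_content flag, mutable block_start/last_content_end, trailing finalization) by a two-pass pipeline: build per-line records (absolute start, content end, is_blank), then group consecutive records by blankness with itertools.groupby and emit one range per non-blank group, the last group extending to the end of the text.
import Mathlib
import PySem

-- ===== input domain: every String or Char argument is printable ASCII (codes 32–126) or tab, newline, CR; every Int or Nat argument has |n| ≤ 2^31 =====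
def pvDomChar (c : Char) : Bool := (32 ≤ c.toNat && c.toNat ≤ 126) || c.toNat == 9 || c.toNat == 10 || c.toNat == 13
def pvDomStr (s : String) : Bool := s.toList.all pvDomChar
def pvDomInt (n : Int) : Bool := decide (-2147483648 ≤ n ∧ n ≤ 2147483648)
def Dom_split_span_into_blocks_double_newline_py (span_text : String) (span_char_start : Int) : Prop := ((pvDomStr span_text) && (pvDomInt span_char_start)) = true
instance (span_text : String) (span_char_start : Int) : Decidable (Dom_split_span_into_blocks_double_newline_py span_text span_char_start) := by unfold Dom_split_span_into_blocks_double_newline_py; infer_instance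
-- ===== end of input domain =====

-- B replaces A's single stateful scan by per-line records grouped by blankness (alternative decomposition, same cost).
-- Equivalence of the RETURN values is proved on Dom; neither program mutates its arguments.

-- Shared helpers (both Pythons call splitlines(keepends=True) and compute the same content length).
-- Hand port of str.splitlines(keepends=True): exact on Dom, whose strings contain no
-- line-break characters other than '\n', '\r', '\r\n' (no \v/\f/\x1c-\x1e/\x85/\u2028/\u2029).
def pvSplitKeepGo (acc : List Char) : List Char → List (List Char)
  | [] => if acc.isEmpty then [] else [acc.reverse]
  | '\r' :: '\n' :: rest => (acc.reverse ++ ['\r', '\n']) :: pvSplitKeepGo [] rest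
  | '\r' :: rest => (acc.reverse ++ ['\r']) :: pvSplitKeepGo [] rest
  | '\n' :: rest => (acc.reverse ++ ['\n']) :: pvSplitKeepGo [] rest
  | c :: rest => pvSplitKeepGo (c :: acc) rest

def pvSplitKeep (s : List Char) : List (List Char) := pvSplitKeepGo [] s

-- content_len of a kept-ends line: len minus the trailing terminator, exactly as both Pythons compute it
def pvContentLen (line : List Char) : Int :=
  if PySem.Chars.endswith line ['\r', '\n'] then (line.length : Int) - 2
  else if PySem.Chars.endswith line ['\n'] || PySem.Chars.endswith line ['\r'] then (line.length : Int) - 1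
  else (line.length : Int)

-- ===== PORT A =====
-- A's loop state: (block_ranges, current_pos, block_start, last_content_end, has_content)
def pvStepA (start : Int) (st : List (Int × Int) × Int × Int × Int × Bool) (line : List Char) :
    List (Int × Int) × Int × Int × Int × Bool :=
  let line_len : Int := (line.length : Int)
  let content_len : Int := pvContentLen line
  if content_len = 0 then
    let ranges := if st.2.2.2.2 then st.1 ++ [(st.2.2.1, st.2.2.2.1)] else st.1
    let cp := st.2.1 + line_len
    (ranges, cp, start + cp, start + cp, false)
  else
    (st.1, st.2.1 + line_len, st.2.2.1, start + st.2.1 + content_len, true)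

def split_span_into_blocks_double_newline_py (span_text : String) (span_char_start : Int) : List (Int × Int) :=
  let st := (pvSplitKeep span_text.toList).foldl (pvStepA span_char_start)
              ([], 0, span_char_start, span_char_start, false)
  if st.2.2.2.2 then st.1 ++ [(st.2.2.1, span_char_start + (span_text.toList.length : Int))] else st.1

-- ===== PORT B =====
-- Pass 1: one record per line, (absolute start, absolute content end, is_blank)
def pvRecs (start : Int) : Int → List (List Char) → List (Int × Int × Bool)
  | _, [] => []
  | pos, line :: rest =>
      let cl := pvContentLen line
      (start + pos, start + pos + cl, cl == 0) :: pvRecs start (pos + (line.length : Int)) rest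

-- itertools.groupby on the blank flag: maximal runs of records with equal flag
def pvGroups : List (Int × Int × Bool) → List (Bool × List (Int × Int × Bool))
  | [] => []
  | r :: rs =>
      (r.2.2, r :: rs.takeWhile (fun x => x.2.2 == r.2.2)) ::
        pvGroups (rs.dropWhile (fun x => x.2.2 == r.2.2))
termination_by rs => rs.length
decreasing_by
  exact Nat.lt_succ_of_le (List.length_dropWhile_le _ _)

-- Pass 2: one range per non-blank group; the last group extends to the end of the text
def pvEmit (eot : Int) : List (Bool × List (Int × Int × Bool)) → List (Int × Int)
  | [] => []
  | (blank, g) :: rest =>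
      if blank then pvEmit eot rest
      else ((g.headD (0, 0, false)).1,
            if rest.isEmpty then eot else (g.getLastD (0, 0, false)).2.1) :: pvEmit eot rest

def split_span_into_blocks_double_newline_py_alt (span_text : String) (span_char_start : Int) : List (Int × Int) :=
  let recs := pvRecs span_char_start 0 (pvSplitKeep span_text.toList)
  pvEmit (span_char_start + (span_text.toList.length : Int)) (pvGroups recs)

-- ===== PRECONDITION & SPEC =====
def Spec_split_span_into_blocks_double_newline_py (span_text : String) (span_char_start : Int) (out : List (Int × Int)) : Prop := out = split_span_into_blocks_double_newline_py_alt span_text span_char_start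
instance (span_text : String) (span_char_start : Int) (out : List (Int × Int)) : Decidable (Spec_split_span_into_blocks_double_newline_py span_text span_char_start out) := by unfold Spec_split_span_into_blocks_double_newline_py; infer_instance

-- ===== CLAIM (what is proved, stated in full; the proofs are below) =====
def Claim_equal_split_span_into_blocks_double_newline_py : Prop := ∀ (span_text : String) (span_char_start : Int), Dom_split_span_into_blocks_double_newline_py span_text span_char_start → Spec_split_span_into_blocks_double_newline_py span_text span_char_start (split_span_into_blocks_double_newline_py span_text span_char_start)

-- ===== LEMMAS AND PROOFS =====

-- Reference recursion: pvR = "outside a block", pvS = "inside a block started at bstart,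
-- last content end lce"; both ports are reduced to it.
mutual
def pvR (start eot : Int) (pos : Int) : List (List Char) → List (Int × Int)
  | [] => []
  | l :: ls =>
      if pvContentLen l = 0 then pvR start eot (pos + (l.length : Int)) ls
      else pvS start eot (start + pos) (start + pos + pvContentLen l) (pos + (l.length : Int)) ls

def pvS (start eot bstart lce : Int) (pos : Int) : List (List Char) → List (Int × Int)
  | [] => [(bstart, eot)]
  | l :: ls =>
      if pvContentLen l = 0 then (bstart, lce) :: pvR start eot (pos + (l.length : Int)) ls
      else pvS start eot bstart (start + pos + pvContentLen l) (pos + (l.length : Int)) ls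
end

-- Direct recursion on the record list (groups-free reading of pvEmit ∘ pvGroups)
mutual
def pvE (eot : Int) : List (Int × Int × Bool) → List (Int × Int)
  | [] => []
  | r :: rs => if r.2.2 then pvE eot rs else pvF eot r.1 r.2.1 rs

def pvF (eot b e : Int) : List (Int × Int × Bool) → List (Int × Int)
  | [] => [(b, eot)]
  | r :: rs => if r.2.2 then (b, e) :: pvE eot rs else pvF eot b r.2.1 rs
end

theorem pvE_dropWhile_blank (eot : Int) (rs : List (Int × Int × Bool)) :
    pvE eot (rs.dropWhile (fun x => x.2.2)) = pvE eot rs := by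
  induction rs with
  | nil => rfl
  | cons r rs ih =>
    by_cases h : r.2.2
    · simp [h, ih, pvE]
    · simp [h]

theorem pvF_run (eot : Int) (t' : List (Int × Int × Bool)) :
    ∀ (g : List (Int × Int × Bool)), (∀ x ∈ g, x.2.2 = false) → ∀ (b e : Int),
      pvF eot b e (g ++ t') = pvF eot b ((g.map (fun x => x.2.1)).getLastD e) t' := by
  intro g
  induction g with
  | nil => intro _ b e; rfl
  | cons x g ih =>
    intro hg b e
    have hx : x.2.2 = false := hg x (List.mem_cons_self ..)
    simp only [List.cons_append, pvF, hx, Bool.false_eq_true, if_false, List.map_cons,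
      List.getLastD_cons]
    exact ih (fun y hy => hg y (List.mem_cons_of_mem _ hy)) b x.2.1

theorem getLastD_map_snd_fst (g : List (Int × Int × Bool)) (r : Int × Int × Bool) :
    (g.map (fun x => x.2.1)).getLastD r.2.1 = (g.getLastD r).2.1 := by
  induction g generalizing r with
  | nil => rfl
  | cons x g ih => simp only [List.map_cons, List.getLastD_cons, ih]

theorem head_dropWhile_false {α : Type} (p : α → Bool) (l : List α) (y : α) (u : List α)
    (h : l.dropWhile p = y :: u) : p y = false := by
  induction l with
  | nil => simp [List.dropWhile] at h
  | cons a l ih =>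
    by_cases ha : p a
    · rw [List.dropWhile_cons_of_pos ha] at h; exact ih h
    · rw [List.dropWhile_cons_of_neg ha] at h
      cases h; simpa using ha

-- pvEmit ∘ pvGroups collapses to the direct recursion pvE
theorem pvEmit_pvGroups (eot : Int) (rs : List (Int × Int × Bool)) :
    pvEmit eot (pvGroups rs) = pvE eot rs := by
  induction rs using pvGroups.induct with
  | case1 => simp [pvGroups, pvEmit, pvE]
  | case2 r rs ih =>
    by_cases h : r.2.2
    · -- blank head: its whole group is skipped by pvEmit
      rw [h] at ih
      have hdw : rs.dropWhile (fun x => x.2.2 == true) = rs.dropWhile (fun x => x.2.2) := by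
        simp
      rw [hdw] at ih
      simp [pvGroups, pvEmit, pvE, h, ih, pvE_dropWhile_blank]
    · -- non-blank head: the group is a maximal non-blank run
      have hb : r.2.2 = false := by simpa using h
      have hg : ∀ x ∈ rs.takeWhile (fun x => x.2.2 == r.2.2), x.2.2 = false := by
        intro x hx
        have := List.mem_takeWhile_imp hx
        simpa [hb] using this
      rw [pvGroups, pvEmit, if_neg h, ih, List.headD_cons]
      rw [pvE, if_neg h]
      rw [show pvF eot r.1 r.2.1 rs
            = pvF eot r.1 r.2.1 (rs.takeWhile (fun x => x.2.2 == r.2.2)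
                ++ rs.dropWhile (fun x => x.2.2 == r.2.2)) from by
        rw [List.takeWhile_append_dropWhile]]
      rw [pvF_run eot _ _ hg r.1 r.2.1]
      cases hdw : rs.dropWhile (fun x => x.2.2 == r.2.2) with
      | nil =>
        simp [pvGroups, pvE, pvF]
      | cons y u =>
        have hy : y.2.2 = true := by
          simpa [hb] using head_dropWhile_false _ rs y u hdw
        have hie : (pvGroups (y :: u)).isEmpty = false := by
          rw [pvGroups]; simp
        rw [hie, pvE, if_pos hy, pvF, if_pos hy, getLastD_map_snd_fst, List.getLastD_cons]
        simp

-- pvE / pvF on the record list are pvR / pvS on the line list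
theorem pvE_pvRecs (start eot : Int) (ls : List (List Char)) :
    (∀ pos, pvE eot (pvRecs start pos ls) = pvR start eot pos ls) ∧
    (∀ b e pos, pvF eot b e (pvRecs start pos ls) = pvS start eot b e pos ls) := by
  induction ls with
  | nil => exact ⟨fun _ => rfl, fun _ _ _ => rfl⟩
  | cons l ls ih =>
    constructor
    · intro pos
      by_cases h : pvContentLen l = 0
      · simp [pvRecs, pvE, pvR, h, ih.1]
      · simp [pvRecs, pvE, pvR, h, ih.2]
    · intro b e pos
      by_cases h : pvContentLen l = 0
      · simp [pvRecs, pvF, pvS, h, ih.1]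
      · simp [pvRecs, pvF, pvS, h, ih.2]

-- A's trailing finalization
def pvFinA (eot : Int) (st : List (Int × Int) × Int × Int × Int × Bool) : List (Int × Int) :=
  if st.2.2.2.2 then st.1 ++ [(st.2.2.1, eot)] else st.1

-- A's fold with its finalization equals pvR / pvS
theorem pvFoldA (start eot : Int) (ls : List (List Char)) :
    ∀ (ranges : List (Int × Int)) (pos bstart lce : Int) (hc : Bool),
      (hc = false → bstart = start + pos) →
      pvFinA eot (ls.foldl (pvStepA start) (ranges, pos, bstart, lce, hc))
      = ranges ++ (if hc then pvS start eot bstart lce pos ls else pvR start eot pos ls) := by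
  induction ls with
  | nil =>
    intro ranges pos bstart lce hc _
    cases hc <;> simp [pvR, pvS, pvFinA]
  | cons l ls ih =>
    intro ranges pos bstart lce hc hinv
    by_cases h : pvContentLen l = 0
    · cases hc with
      | false =>
        have hb := hinv rfl
        simp only [List.foldl_cons, pvStepA, if_pos h, Bool.false_eq_true, if_false]
        rw [ih ranges (pos + (l.length : Int)) _ _ false (fun _ => rfl)]
        simp [pvR, h, hb]
      | true =>
        simp only [List.foldl_cons, pvStepA, if_pos h, if_true]
        rw [ih (ranges ++ [(bstart, lce)]) (pos + (l.length : Int)) _ _ false (fun _ => rfl)]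
        simp [pvS, h]
    · cases hc with
      | false =>
        have hb := hinv rfl
        simp only [List.foldl_cons, pvStepA, if_neg h]
        rw [ih ranges (pos + (l.length : Int)) bstart (start + pos + pvContentLen l) true
              (by intro hcc; exact absurd hcc (by simp))]
        simp [pvR, h, hb]
      | true =>
        simp only [List.foldl_cons, pvStepA, if_neg h]
        rw [ih ranges (pos + (l.length : Int)) bstart (start + pos + pvContentLen l) true
              (by intro hcc; exact absurd hcc (by simp))]
        simp [pvS, h]

-- ===== VERDICT (by name: the statement is the Claim_ definition above) =====
theorem split_span_into_blocks_double_newline_py_spec : Claim_equal_split_span_into_blocks_double_newline_py := by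
  intro span_text span_char_start _
  unfold Spec_split_span_into_blocks_double_newline_py
  unfold split_span_into_blocks_double_newline_py split_span_into_blocks_double_newline_py_alt
  rw [pvEmit_pvGroups,
      (pvE_pvRecs span_char_start (span_char_start + (span_text.toList.length : Int))
        (pvSplitKeep span_text.toList)).1 0]
  have := pvFoldA span_char_start (span_char_start + (span_text.toList.length : Int))
      (pvSplitKeep span_text.toList) [] 0 span_char_start span_char_start false (fun _ => by simp)
  simpa [pvFinA] using this
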